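-- pv_equiv track=rewrite | github.com/mortyc126-debug/SHA | clifford_step4.py | wang_chain_decompose
-- ===== SOURCE A (Python) =====
-- MASK = 0xFFFFFFFF
--
-- def rotr(x, n): return ((x >> n) | (x << (32 - n))) & MASK
--
-- def Sig0(x): return rotr(x, 2) ^ rotr(x, 13) ^ rotr(x, 22)
--
-- def Sig1(x): return rotr(x, 6) ^ rotr(x, 11) ^ rotr(x, 25)
--
-- def Ch(e, f, g):  return ((e & f) ^ (~e & g)) & MASK
--
-- def Maj(a, b, c): return ((a & b) ^ (a & c) ^ (b & c)) & MASK
--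
-- def hw(x): return bin(x).count('1')
--
-- def add(x, y): return (x + y) & MASK
--
-- def sub(x, y): return (x - y) & MASK
--
-- IV = [0x6a09e667, 0xbb67ae85, 0x3c6ef372, 0xa54ff53a,
--       0x510e527f, 0x9b05688c, 0x1f83d9ab, 0x5be0cd19]
--
-- K = [0x428a2f98, 0x71374491, 0xb5c0fbcf, 0xe9b5dba5,
--      0x3956c25b, 0x59f111f1, 0x923f82a4, 0xab1c5ed5,
--      0xd807aa98, 0x12835b01, 0x243185be, 0x550c7dc3,
--      0x72be5d74, 0x80deb1fe, 0x9bdc06a7, 0xc19bf174,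
--      0xe49b69c1, 0xefbe4786, 0x0fc19dc6, 0x240ca1cc,
--      0x2de92c6f, 0x4a7484aa, 0x5cb0a9dc, 0x76f988da,
--      0x983e5152, 0xa831c66d, 0xb00327c8, 0xbf597fc7,
--      0xc6e00bf3, 0xd5a79147, 0x06ca6351, 0x14292967,
--      0x27b70a85, 0x2e1b2138, 0x4d2c6dfc, 0x53380d13,
--      0x650a7354, 0x766a0abb, 0x81c2c92e, 0x92722c85,
--      0xa2bfe8a1, 0xa81a664b, 0xc24b8b70, 0xc76c51a3,
--      0xd192e819, 0xd6990624, 0xf40e3585, 0x106aa070,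
--      0x19a4c116, 0x1e376c08, 0x2748774c, 0x34b0bcb5,
--      0x391c0cb3, 0x4ed8aa4a, 0x5b9cca4f, 0x682e6ff3,
--      0x748f82ee, 0x78a5636f, 0x84c87814, 0x8cc70208,
--      0x90befffa, 0xa4506ceb, 0xbef9a3f7, 0xc67178f2]
--
-- def wang_chain_decompose(W0, W1, DW0=0x8000):
--     """Run Wang chain and decompose each round's Da into components."""
--     W16_n = [W0, W1] + [0]*14
--     W16_f = [W0 ^ DW0, W1] + [0]*14  # XOR diff in W[0]
--
--     state_n = list(IV)
--     state_f = list(IV)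
--
--     round_data = []
--
--     for r in range(17):
--         a_n,b_n,c_n,d_n,e_n,f_n,g_n,h_n = state_n
--         a_f,b_f,c_f,d_f,e_f,f_f,g_f,h_f = state_f
--
--         # Additive differentials
--         Da = sub(a_f, a_n)
--         De = sub(e_f, e_n)
--
--         # AND terms in this round's DT2:
--         # DT2 = DSig0 + DMaj
--         # DSig0 = Sig0(c_a) - 2(Sig0(a)∧Sig0(c_a))
--         # where c_a = (a+Da)⊕a = a_f ⊕ a_n
--
--         c_a = a_f ^ a_n  # XOR diff = carry-xor
--         sig0_and = (2 * (Sig0(a_n) & Sig0(c_a))) & MASK  # the AND correction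
--
--         # DMaj = Maj(a_f, b_f, c_f) - Maj(a_n, b_n, c_n)
--         DMaj = sub(Maj(a_f, b_f, c_f), Maj(a_n, b_n, c_n))
--
--         # Linear part of DT2: Sig0(c_a) + part_of_Maj
--         sig0_linear = Sig0(c_a)  # GF2-linear
--         DT2_full = sub(add(Sig0(a_f), Maj(a_f,b_f,c_f)),
--                        add(Sig0(a_n), Maj(a_n,b_n,c_n)))
--
--         round_data.append({
--             'r': r+1,
--             'Da': Da, 'De': De,
--             'hw_Da': hw(Da), 'hw_De': hw(De),
--             'sig0_and': sig0_and,
--             'hw_sig0_and': hw(sig0_and),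
--             'DMaj': DMaj,
--             'hw_DMaj': hw(DMaj),
--             'DT2': DT2_full,
--             'hw_DT2': hw(DT2_full),
--         })
--
--         # Advance both states through round r
--         # Need to use adaptive DW for Wang chain (cancel De[r+1])
--         if r < 16:
--             # Compute W for normal state
--             W_n = W16_n[r] if r < 16 else 0
--             W_f = W16_f[r] if r < 16 else 0
--
--             T1_n = add(add(add(add(h_n, Sig1(e_n)), Ch(e_n,f_n,g_n)), K[r]), W_n)
--             T2_n = add(Sig0(a_n), Maj(a_n,b_n,c_n))
--             state_n = [add(T1_n, T2_n), a_n, b_n, c_n, add(d_n, T1_n), e_n, f_n, g_n]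
--
--             T1_f = add(add(add(add(h_f, Sig1(e_f)), Ch(e_f,f_f,g_f)), K[r]), W_f)
--             T2_f = add(Sig0(a_f), Maj(a_f,b_f,c_f))
--             state_f = [add(T1_f, T2_f), a_f, b_f, c_f, add(d_f, T1_f), e_f, f_f, g_f]
--
--     return round_data
-- ===== SOURCE B (Python) =====
-- MASK = 0xFFFFFFFF
--
-- def rotr(x, n): return ((x >> n) | (x << (32 - n))) & MASK
--
-- def Sig0(x): return rotr(x, 2) ^ rotr(x, 13) ^ rotr(x, 22)
--
-- def Sig1(x): return rotr(x, 6) ^ rotr(x, 11) ^ rotr(x, 25)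
--
-- def Ch(e, f, g):  return ((e & f) ^ (~e & g)) & MASK
--
-- def Maj(a, b, c): return ((a & b) ^ (a & c) ^ (b & c)) & MASK
--
-- def hw(x): return bin(x).count('1')
--
-- def add(x, y): return (x + y) & MASK
--
-- def sub(x, y): return (x - y) & MASK
--
-- IV = [0x6a09e667, 0xbb67ae85, 0x3c6ef372, 0xa54ff53a,
--       0x510e527f, 0x9b05688c, 0x1f83d9ab, 0x5be0cd19]
--
-- K = [0x428a2f98, 0x71374491, 0xb5c0fbcf, 0xe9b5dba5,
--      0x3956c25b, 0x59f111f1, 0x923f82a4, 0xab1c5ed5,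
--      0xd807aa98, 0x12835b01, 0x243185be, 0x550c7dc3,
--      0x72be5d74, 0x80deb1fe, 0x9bdc06a7, 0xc19bf174]
--
--
-- def _run_chain(w0, w1):
--     """Simulate the SHA-256 chain alone: the 17 states seen before each of
--     rounds 0..16 (the last one unadvanced)."""
--     states = []
--     st = list(IV)
--     for r in range(17):
--         states.append(st)
--         if r < 16:
--             a, b, c, d, e, f, g, h = st
--             w = w0 if r == 0 else (w1 if r == 1 else 0)
--             T1 = add(add(add(add(h, Sig1(e)), Ch(e, f, g)), K[r]), w)
--             T2 = add(Sig0(a), Maj(a, b, c))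
--             st = [add(T1, T2), a, b, c, add(d, T1), e, f, g]
--     return states
--
--
-- def _decompose(r, sn, sf):
--     a_n, b_n, c_n, e_n = sn[0], sn[1], sn[2], sn[4]
--     a_f, b_f, c_f, e_f = sf[0], sf[1], sf[2], sf[4]
--     Da = sub(a_f, a_n)
--     De = sub(e_f, e_n)
--     c_a = a_f ^ a_n
--     sig0_and = (2 * (Sig0(a_n) & Sig0(c_a))) & MASK
--     DMaj = sub(Maj(a_f, b_f, c_f), Maj(a_n, b_n, c_n))
--     DT2 = sub(add(Sig0(a_f), Maj(a_f, b_f, c_f)),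
--               add(Sig0(a_n), Maj(a_n, b_n, c_n)))
--     return {
--         'r': r + 1,
--         'Da': Da, 'De': De,
--         'hw_Da': hw(Da), 'hw_De': hw(De),
--         'sig0_and': sig0_and,
--         'hw_sig0_and': hw(sig0_and),
--         'DMaj': DMaj,
--         'hw_DMaj': hw(DMaj),
--         'DT2': DT2,
--         'hw_DT2': hw(DT2),
--     }
--
--
-- def wang_chain_decompose(W0, W1, DW0=0x8000):
--     """Two-phase: simulate each chain separately, then decompose the paired states."""
--     states_n = _run_chain(W0, W1)
--     states_f = _run_chain(W0 ^ DW0, W1)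
--     return [_decompose(r, sn, sf)
--             for r, (sn, sf) in enumerate(zip(states_n, states_f))]
-- ===== Notes on version B (the rewrite author's own statement) =====
-- stated objective: alternative
-- what changed: A interleaves chain simulation and differential decomposition in one 17-round loop carrying both states and the output list; B first simulates each SHA-256 chain separately, collecting the 17 pre-round states per chain, and then decomposes the zipped state pairs in a second pass.
import Mathlib
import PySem

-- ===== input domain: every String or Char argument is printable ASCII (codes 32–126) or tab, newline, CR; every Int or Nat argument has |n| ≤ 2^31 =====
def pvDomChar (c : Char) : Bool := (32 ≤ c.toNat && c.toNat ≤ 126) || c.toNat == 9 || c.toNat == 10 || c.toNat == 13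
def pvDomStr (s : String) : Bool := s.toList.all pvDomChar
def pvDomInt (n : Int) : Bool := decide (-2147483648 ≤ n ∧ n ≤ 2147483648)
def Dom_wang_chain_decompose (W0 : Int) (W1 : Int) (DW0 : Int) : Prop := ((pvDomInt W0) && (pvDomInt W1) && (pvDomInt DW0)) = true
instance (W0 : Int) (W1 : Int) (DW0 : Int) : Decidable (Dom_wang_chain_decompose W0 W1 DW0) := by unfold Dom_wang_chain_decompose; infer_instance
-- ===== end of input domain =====

-- B restructures A's single interleaved loop into two phases (simulate each chain, then decompose
-- the paired states); objective: alternative decomposition, same cost.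

-- shared module-level helpers (used by both Pythons)
def pvMASK : Int := 0xFFFFFFFF
def pvRotr (x : Int) (n : Nat) : Int := PySem.Int.band (PySem.Int.bor (x >>> n) (x <<< (32 - n))) pvMASK
def pvSig0 (x : Int) : Int := PySem.Int.bxor (PySem.Int.bxor (pvRotr x 2) (pvRotr x 13)) (pvRotr x 22)
def pvSig1 (x : Int) : Int := PySem.Int.bxor (PySem.Int.bxor (pvRotr x 6) (pvRotr x 11)) (pvRotr x 25)
def pvCh (e f g : Int) : Int := PySem.Int.band (PySem.Int.bxor (PySem.Int.band e f) (PySem.Int.band (Int.not e) g)) pvMASK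
def pvMaj (a b c : Int) : Int := PySem.Int.band (PySem.Int.bxor (PySem.Int.bxor (PySem.Int.band a b) (PySem.Int.band a c)) (PySem.Int.band b c)) pvMASK
-- hw(x) = bin(x).count('1'); PySem.Int.bitCount reads |x| exactly as Python's bin string does
def pvHw (x : Int) : Int := (PySem.Int.bitCount x : Int)
def pvAdd (x y : Int) : Int := PySem.Int.band (x + y) pvMASK
def pvSub (x y : Int) : Int := PySem.Int.band (x - y) pvMASK
def pvK : List Int := [0x428a2f98, 0x71374491, 0xb5c0fbcf, 0xe9b5dba5, 0x3956c25b, 0x59f111f1, 0x923f82a4, 0xab1c5ed5,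
                       0xd807aa98, 0x12835b01, 0x243185be, 0x550c7dc3, 0x72be5d74, 0x80deb1fe, 0x9bdc06a7, 0xc19bf174]
abbrev pvSt := Int × Int × Int × Int × Int × Int × Int × Int

-- ===== PORT A =====
def wang_chain_decompose (W0 : Int) (W1 : Int) (DW0 : Int) : List (List (String × Int)) :=
  let W16n : List Int := [W0, W1] ++ List.replicate 14 0
  let W16f : List Int := [PySem.Int.bxor W0 DW0, W1] ++ List.replicate 14 0
  let iv : pvSt := (0x6a09e667, 0xbb67ae85, 0x3c6ef372, 0xa54ff53a, 0x510e527f, 0x9b05688c, 0x1f83d9ab, 0x5be0cd19)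
  let res := (List.range 17).foldl (fun (acc : List (List (String × Int)) × pvSt × pvSt) (r : Nat) =>
    let rd := acc.1
    -- a_n,b_n,c_n,d_n,e_n,f_n,g_n,h_n = state_n  (tuple unpack, as projections)
    let a_n := acc.2.1.1; let b_n := acc.2.1.2.1; let c_n := acc.2.1.2.2.1; let d_n := acc.2.1.2.2.2.1
    let e_n := acc.2.1.2.2.2.2.1; let f_n := acc.2.1.2.2.2.2.2.1; let g_n := acc.2.1.2.2.2.2.2.2.1; let h_n := acc.2.1.2.2.2.2.2.2.2
    let a_f := acc.2.2.1; let b_f := acc.2.2.2.1; let c_f := acc.2.2.2.2.1; let d_f := acc.2.2.2.2.2.1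
    let e_f := acc.2.2.2.2.2.2.1; let f_f := acc.2.2.2.2.2.2.2.1; let g_f := acc.2.2.2.2.2.2.2.2.1; let h_f := acc.2.2.2.2.2.2.2.2.2
    let Da := pvSub a_f a_n
    let De := pvSub e_f e_n
    let c_a := PySem.Int.bxor a_f a_n
    let sig0_and := PySem.Int.band (2 * PySem.Int.band (pvSig0 a_n) (pvSig0 c_a)) pvMASK
    let DMaj := pvSub (pvMaj a_f b_f c_f) (pvMaj a_n b_n c_n)
    let _sig0_linear := pvSig0 c_a   -- computed but unused in A's dict, kept for fidelity
    let DT2_full := pvSub (pvAdd (pvSig0 a_f) (pvMaj a_f b_f c_f)) (pvAdd (pvSig0 a_n) (pvMaj a_n b_n c_n))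
    let row : List (String × Int) :=
      [("r", (r : Int) + 1), ("Da", Da), ("De", De), ("hw_Da", pvHw Da), ("hw_De", pvHw De),
       ("sig0_and", sig0_and), ("hw_sig0_and", pvHw sig0_and), ("DMaj", DMaj), ("hw_DMaj", pvHw DMaj),
       ("DT2", DT2_full), ("hw_DT2", pvHw DT2_full)]
    let rd := rd ++ [row]
    if r < 16 then
      let W_n := if r < 16 then PySem.List.pyGetD W16n (r : Int) 0 else 0
      let W_f := if r < 16 then PySem.List.pyGetD W16f (r : Int) 0 else 0
      let T1_n := pvAdd (pvAdd (pvAdd (pvAdd h_n (pvSig1 e_n)) (pvCh e_n f_n g_n)) (PySem.List.pyGetD pvK (r : Int) 0)) W_n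
      let T2_n := pvAdd (pvSig0 a_n) (pvMaj a_n b_n c_n)
      let sn' : pvSt := (pvAdd T1_n T2_n, a_n, b_n, c_n, pvAdd d_n T1_n, e_n, f_n, g_n)
      let T1_f := pvAdd (pvAdd (pvAdd (pvAdd h_f (pvSig1 e_f)) (pvCh e_f f_f g_f)) (PySem.List.pyGetD pvK (r : Int) 0)) W_f
      let T2_f := pvAdd (pvSig0 a_f) (pvMaj a_f b_f c_f)
      let sf' : pvSt := (pvAdd T1_f T2_f, a_f, b_f, c_f, pvAdd d_f T1_f, e_f, f_f, g_f)
      (rd, sn', sf')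
    else (rd, acc.2.1, acc.2.2)) ([], iv, iv)
  res.1

-- ===== PORT B =====
def pvRunChain (w0 w1 : Int) : List pvSt :=
  ((List.range 17).foldl (fun (acc : List pvSt × pvSt) (r : Nat) =>
    let states := acc.1 ++ [acc.2]
    if r < 16 then
      -- a,b,c,d,e,f,g,h = st  (tuple unpack, as projections)
      let a := acc.2.1; let b := acc.2.2.1; let c := acc.2.2.2.1; let d := acc.2.2.2.2.1
      let e := acc.2.2.2.2.2.1; let f := acc.2.2.2.2.2.2.1; let g := acc.2.2.2.2.2.2.2.1; let h := acc.2.2.2.2.2.2.2.2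
      let w := if r = 0 then w0 else if r = 1 then w1 else 0
      let T1 := pvAdd (pvAdd (pvAdd (pvAdd h (pvSig1 e)) (pvCh e f g)) (PySem.List.pyGetD pvK (r : Int) 0)) w
      let T2 := pvAdd (pvSig0 a) (pvMaj a b c)
      (states, (pvAdd T1 T2, a, b, c, pvAdd d T1, e, f, g))
    else (states, acc.2))
    ([], (0x6a09e667, 0xbb67ae85, 0x3c6ef372, 0xa54ff53a, 0x510e527f, 0x9b05688c, 0x1f83d9ab, 0x5be0cd19))).1

def pvDecompose (r : Int) (sn sf : pvSt) : List (String × Int) :=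
  let a_n := sn.1; let b_n := sn.2.1; let c_n := sn.2.2.1; let e_n := sn.2.2.2.2.1
  let a_f := sf.1; let b_f := sf.2.1; let c_f := sf.2.2.1; let e_f := sf.2.2.2.2.1
  let Da := pvSub a_f a_n
  let De := pvSub e_f e_n
  let c_a := PySem.Int.bxor a_f a_n
  let sig0_and := PySem.Int.band (2 * PySem.Int.band (pvSig0 a_n) (pvSig0 c_a)) pvMASK
  let DMaj := pvSub (pvMaj a_f b_f c_f) (pvMaj a_n b_n c_n)
  let DT2 := pvSub (pvAdd (pvSig0 a_f) (pvMaj a_f b_f c_f)) (pvAdd (pvSig0 a_n) (pvMaj a_n b_n c_n))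
  [("r", r + 1), ("Da", Da), ("De", De), ("hw_Da", pvHw Da), ("hw_De", pvHw De),
   ("sig0_and", sig0_and), ("hw_sig0_and", pvHw sig0_and), ("DMaj", DMaj), ("hw_DMaj", pvHw DMaj),
   ("DT2", DT2), ("hw_DT2", pvHw DT2)]

def wang_chain_decompose_alt (W0 : Int) (W1 : Int) (DW0 : Int) : List (List (String × Int)) :=
  let states_n := pvRunChain W0 W1
  let states_f := pvRunChain (PySem.Int.bxor W0 DW0) W1
  (PySem.List.enumerate (states_n.zip states_f)).map (fun p => pvDecompose p.1 p.2.1 p.2.2)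

-- ===== PRECONDITION & SPEC =====
def Spec_wang_chain_decompose (W0 : Int) (W1 : Int) (DW0 : Int) (out : List (List (String × Int))) : Prop := out = wang_chain_decompose_alt W0 W1 DW0
instance (W0 : Int) (W1 : Int) (DW0 : Int) (out : List (List (String × Int))) : Decidable (Spec_wang_chain_decompose W0 W1 DW0 out) := by unfold Spec_wang_chain_decompose; infer_instance

-- ===== CLAIM (what is proved, stated in full; the proofs are below) =====
def Claim_equal_wang_chain_decompose : Prop := ∀ (W0 : Int) (W1 : Int) (DW0 : Int), Dom_wang_chain_decompose W0 W1 DW0 → Spec_wang_chain_decompose W0 W1 DW0 (wang_chain_decompose W0 W1 DW0)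

-- ===== LEMMAS AND PROOFS =====

-- proof-side helpers: one chain step in B's form, and the rows generated by a guarded fold
def pvAdvB (w0 w1 : Int) (r : Nat) (s : pvSt) : pvSt :=
  if r < 16 then
    let a := s.1; let b := s.2.1; let c := s.2.2.1; let d := s.2.2.2.1
    let e := s.2.2.2.2.1; let f := s.2.2.2.2.2.1; let g := s.2.2.2.2.2.2.1; let h := s.2.2.2.2.2.2.2
    let w := if r = 0 then w0 else if r = 1 then w1 else 0
    let T1 := pvAdd (pvAdd (pvAdd (pvAdd h (pvSig1 e)) (pvCh e f g)) (PySem.List.pyGetD pvK (r : Int) 0)) w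
    let T2 := pvAdd (pvSig0 a) (pvMaj a b c)
    (pvAdd T1 T2, a, b, c, pvAdd d T1, e, f, g)
  else s

def pvRowsG {L S : Type} (row : Nat → S → L) (g : Nat → S → S) : Nat → Nat → S → List L
  | _, 0, _ => []
  | i, n + 1, st => row i st :: pvRowsG row g (i + 1) n (g i st)

lemma pvFoldlChar {L S : Type} (f : (List L × S) → Nat → (List L × S))
    (g : Nat → S → S) (row : Nat → S → L)
    (hf : ∀ (p : List L × S) (r : Nat), f p r = (p.1 ++ [row r p.2], g r p.2)) :
    ∀ (n i : Nat) (acc : List L) (st : S),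
      ((List.range' i n).foldl f (acc, st)).1 = acc ++ pvRowsG row g i n st := by
  intro n
  induction n with
  | zero => intro i acc st; simp [pvRowsG]
  | succ n ih =>
    intro i acc st
    rw [List.range'_succ]
    simp only [List.foldl_cons, hf]
    rw [ih (i + 1) (acc ++ [row i st]) (g i st)]
    simp [pvRowsG]

-- A's per-round W lookup in [w0, w1] + [0]*14 agrees with B's if-chain for r < 16
lemma pvWLookup (w0 w1 : Int) (r : Nat) (hr : r < 16) :
    PySem.List.pyGetD ([w0, w1] ++ List.replicate 14 0) (r : Int) 0
      = (if r = 0 then w0 else if r = 1 then w1 else 0) := by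
  interval_cases r <;> rfl

lemma pvAfold (W0 W1 DW0 : Int) (p : List (List (String × Int)) × pvSt × pvSt) (r : Nat) :
    (fun (acc : List (List (String × Int)) × pvSt × pvSt) (r : Nat) =>
    let rd := acc.1
    let a_n := acc.2.1.1; let b_n := acc.2.1.2.1; let c_n := acc.2.1.2.2.1; let d_n := acc.2.1.2.2.2.1
    let e_n := acc.2.1.2.2.2.2.1; let f_n := acc.2.1.2.2.2.2.2.1; let g_n := acc.2.1.2.2.2.2.2.2.1; let h_n := acc.2.1.2.2.2.2.2.2.2
    let a_f := acc.2.2.1; let b_f := acc.2.2.2.1; let c_f := acc.2.2.2.2.1; let d_f := acc.2.2.2.2.2.1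
    let e_f := acc.2.2.2.2.2.2.1; let f_f := acc.2.2.2.2.2.2.2.1; let g_f := acc.2.2.2.2.2.2.2.2.1; let h_f := acc.2.2.2.2.2.2.2.2.2
    let Da := pvSub a_f a_n
    let De := pvSub e_f e_n
    let c_a := PySem.Int.bxor a_f a_n
    let sig0_and := PySem.Int.band (2 * PySem.Int.band (pvSig0 a_n) (pvSig0 c_a)) pvMASK
    let DMaj := pvSub (pvMaj a_f b_f c_f) (pvMaj a_n b_n c_n)
    let _sig0_linear := pvSig0 c_a
    let DT2_full := pvSub (pvAdd (pvSig0 a_f) (pvMaj a_f b_f c_f)) (pvAdd (pvSig0 a_n) (pvMaj a_n b_n c_n))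
    let row : List (String × Int) :=
      [("r", (r : Int) + 1), ("Da", Da), ("De", De), ("hw_Da", pvHw Da), ("hw_De", pvHw De),
       ("sig0_and", sig0_and), ("hw_sig0_and", pvHw sig0_and), ("DMaj", DMaj), ("hw_DMaj", pvHw DMaj),
       ("DT2", DT2_full), ("hw_DT2", pvHw DT2_full)]
    let rd := rd ++ [row]
    if r < 16 then
      let W_n := if r < 16 then PySem.List.pyGetD ([W0, W1] ++ List.replicate 14 0) (r : Int) 0 else 0
      let W_f := if r < 16 then PySem.List.pyGetD ([PySem.Int.bxor W0 DW0, W1] ++ List.replicate 14 0) (r : Int) 0 else 0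
      let T1_n := pvAdd (pvAdd (pvAdd (pvAdd h_n (pvSig1 e_n)) (pvCh e_n f_n g_n)) (PySem.List.pyGetD pvK (r : Int) 0)) W_n
      let T2_n := pvAdd (pvSig0 a_n) (pvMaj a_n b_n c_n)
      let sn' : pvSt := (pvAdd T1_n T2_n, a_n, b_n, c_n, pvAdd d_n T1_n, e_n, f_n, g_n)
      let T1_f := pvAdd (pvAdd (pvAdd (pvAdd h_f (pvSig1 e_f)) (pvCh e_f f_f g_f)) (PySem.List.pyGetD pvK (r : Int) 0)) W_f
      let T2_f := pvAdd (pvSig0 a_f) (pvMaj a_f b_f c_f)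
      let sf' : pvSt := (pvAdd T1_f T2_f, a_f, b_f, c_f, pvAdd d_f T1_f, e_f, f_f, g_f)
      (rd, sn', sf')
    else (rd, acc.2.1, acc.2.2)) p r
    = (p.1 ++ [pvDecompose (r : Int) p.2.1 p.2.2],
       (pvAdvB W0 W1 r p.2.1, pvAdvB (PySem.Int.bxor W0 DW0) W1 r p.2.2)) := by
  by_cases hr : r < 16
  · simp only [pvAdvB, pvDecompose, hr, if_true, pvWLookup _ _ r hr]
  · simp only [pvAdvB, pvDecompose, hr, if_false]

lemma pvBfold (w0 w1 : Int) (p : List pvSt × pvSt) (r : Nat) :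
    (fun (acc : List pvSt × pvSt) (r : Nat) =>
    let states := acc.1 ++ [acc.2]
    if r < 16 then
      let a := acc.2.1; let b := acc.2.2.1; let c := acc.2.2.2.1; let d := acc.2.2.2.2.1
      let e := acc.2.2.2.2.2.1; let f := acc.2.2.2.2.2.2.1; let g := acc.2.2.2.2.2.2.2.1; let h := acc.2.2.2.2.2.2.2.2
      let w := if r = 0 then w0 else if r = 1 then w1 else 0
      let T1 := pvAdd (pvAdd (pvAdd (pvAdd h (pvSig1 e)) (pvCh e f g)) (PySem.List.pyGetD pvK (r : Int) 0)) w
      let T2 := pvAdd (pvSig0 a) (pvMaj a b c)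
      (states, (pvAdd T1 T2, a, b, c, pvAdd d T1, e, f, g))
    else (states, acc.2)) p r
    = (p.1 ++ [p.2], pvAdvB w0 w1 r p.2) := by
  by_cases hr : r < 16
  · simp only [pvAdvB, hr, if_true]
  · simp only [pvAdvB, hr, if_false]

lemma pvRunChain_eq (w0 w1 : Int) :
    pvRunChain w0 w1 = pvRowsG (fun _ st => st) (pvAdvB w0 w1) 0 17
      ((0x6a09e667, 0xbb67ae85, 0x3c6ef372, 0xa54ff53a, 0x510e527f, 0x9b05688c, 0x1f83d9ab, 0x5be0cd19) : pvSt) := by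
  unfold pvRunChain
  rw [List.range_eq_range']
  refine (pvFoldlChar _ (pvAdvB w0 w1) (fun _ st => st) ?_ 17 0 [] _).trans
    (List.nil_append _)
  exact pvBfold w0 w1

lemma pvZipEnum (g1 g2 : Nat → pvSt → pvSt) :
    ∀ (n i : Nat) (sn sf : pvSt),
      (PySem.List.enumerate ((pvRowsG (fun _ st => st) g1 i n sn).zip
          (pvRowsG (fun _ st => st) g2 i n sf)) (i : Int)).map
            (fun p => pvDecompose p.1 p.2.1 p.2.2)
        = pvRowsG (fun r st => pvDecompose (r : Int) st.1 st.2)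
            (fun r st => (g1 r st.1, g2 r st.2)) i n (sn, sf) := by
  intro n
  induction n with
  | zero => intro i sn sf; simp [pvRowsG, PySem.List.enumerate_nil]
  | succ n ih =>
    intro i sn sf
    simp only [pvRowsG, List.zip_cons_cons, PySem.List.enumerate_cons, List.map_cons]
    rw [← Nat.cast_add_one, ih (i + 1) (g1 i sn) (g2 i sf)]

-- ===== VERDICT (by name: the statement is the Claim_ definition above) =====
theorem wang_chain_decompose_spec : Claim_equal_wang_chain_decompose := by
  intro W0 W1 DW0 _
  unfold Spec_wang_chain_decompose
  simp only [wang_chain_decompose, wang_chain_decompose_alt]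
  rw [List.range_eq_range', pvRunChain_eq, pvRunChain_eq]
  have hB := pvZipEnum (pvAdvB W0 W1) (pvAdvB (PySem.Int.bxor W0 DW0) W1) 17 0
    (0x6a09e667, 0xbb67ae85, 0x3c6ef372, 0xa54ff53a, 0x510e527f, 0x9b05688c, 0x1f83d9ab, 0x5be0cd19)
    (0x6a09e667, 0xbb67ae85, 0x3c6ef372, 0xa54ff53a, 0x510e527f, 0x9b05688c, 0x1f83d9ab, 0x5be0cd19)
  rw [Nat.cast_zero] at hB
  rw [hB]
  refine (pvFoldlChar _
      (fun r st => (pvAdvB W0 W1 r st.1, pvAdvB (PySem.Int.bxor W0 DW0) W1 r st.2))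
      (fun r st => pvDecompose (r : Int) st.1 st.2)
      ?_ 17 0 [] _).trans (List.nil_append _)
  exact pvAfold W0 W1 DW0
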